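-- pv_equiv track=rewrite | github.com/RideGreg/LeetCode | Python/count-substrings-with-only-one-distinct-letter.py | countLetters3
-- ===== SOURCE A (Python) =====
-- def countLetters3(S): # get width of each block
--     left, ans = 0, 0
--     for right in range(len(S)+1):
--         if right == len(S) or S[right] != S[left]:
--             width = right - left
--             ans += width * (width+1) // 2
--             left = right
--     return ans
-- ===== SOURCE B (Python) =====
-- def countLetters3(S):
--     ans = 0
--     cur = 0
--     prev = None
--     for c in S:
--         cur = cur + 1 if c == prev else 1
--         ans += cur
--         prev = c
--     return ans
-- ===== Notes on version B (the rewrite author's own statement) =====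
-- stated objective: simpler
-- what changed: B replaces A's index loop with run-boundary detection and the w*(w+1)//2 triangular closed form by a single character fold that maintains the length of the current run and adds it per character, never computing run widths or the closed form.
import Mathlib
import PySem

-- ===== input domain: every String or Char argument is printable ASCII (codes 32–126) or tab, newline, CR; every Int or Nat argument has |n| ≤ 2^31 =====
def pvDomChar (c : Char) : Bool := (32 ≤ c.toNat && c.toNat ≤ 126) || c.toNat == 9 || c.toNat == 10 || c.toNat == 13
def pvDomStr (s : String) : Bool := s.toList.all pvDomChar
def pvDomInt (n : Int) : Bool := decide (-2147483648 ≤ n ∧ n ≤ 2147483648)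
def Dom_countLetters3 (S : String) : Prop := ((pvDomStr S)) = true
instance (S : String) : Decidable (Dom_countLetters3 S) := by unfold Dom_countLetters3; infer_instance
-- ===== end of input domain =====

-- B replaces A's run-boundary detection + triangular closed form by a per-character
-- incremental accumulation of the current run length; same O(n) cost, simpler.

-- ===== PORT A =====
def countLetters3 (S : String) : Int :=
  let n : Int := PySem.Str.len S
  let st :=
    (PySem.List.pyRange 0 (n + 1) 1).foldl
      (fun (st : Int × Int) right =>
        if right == n || PySem.Str.pyGet? S right != PySem.Str.pyGet? S st.1 then
          let width := right - st.1
          (right, st.2 + PySem.Int.floordiv (width * (width + 1)) 2)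
        else st)
      (0, 0)
  st.2

-- ===== PORT B =====
def countLetters3_alt (S : String) : Int :=
  let st :=
    S.toList.foldl
      (fun (st : Option Char × Int × Int) c =>
        let cur : Int := if st.1 == some c then st.2.1 + 1 else 1
        (some c, cur, st.2.2 + cur))
      (none, 0, 0)
  st.2.2

-- ===== PRECONDITION & SPEC =====
def Spec_countLetters3 (S : String) (out : Int) : Prop := out = countLetters3_alt S
instance (S : String) (out : Int) : Decidable (Spec_countLetters3 S out) := by unfold Spec_countLetters3; infer_instance

-- ===== CLAIM (what is proved, stated in full; the proofs are below) =====
def Claim_equal_countLetters3 : Prop := ∀ (S : String), Dom_countLetters3 S → Spec_countLetters3 S (countLetters3 S)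

-- ===== LEMMAS AND PROOFS =====

/-- triangular number via Python floor division, as in A -/
def pvTri (k : Int) : Int := PySem.Int.floordiv (k * (k + 1)) 2

/-- shared reference: remaining contribution given previous char and current run length -/
def pvG : Option Char → Int → List Char → Int
  | _, cur, [] => pvTri cur
  | prev, cur, c :: r =>
      if some c = prev then pvG prev (cur + 1) r
      else pvTri cur + pvG (some c) 1 r

lemma pvTri_succ (k : Int) (_hk : 0 ≤ k) : pvTri (k + 1) = pvTri k + (k + 1) := by
  obtain ⟨m, hm⟩ : ∃ m, k * (k + 1) = 2 * m := by
    rcases Int.even_mul_succ_self k with ⟨m, hm⟩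
    exact ⟨m, by omega⟩
  have h2 : (k + 1) * (k + 1 + 1) = 2 * (m + (k + 1)) := by ring_nf; nlinarith [hm]
  simp [pvTri, hm, h2]

lemma pvG_zero (p q : Option Char) (cs : List Char) : pvG p 0 cs = pvG q 0 cs := by
  cases cs with
  | nil => rfl
  | cons c r =>
      simp only [pvG]
      split_ifs with h1 h2 h2 <;> simp_all [pvTri, PySem.Int.floordiv]

/-- A's loop, from index i with current block start l, equals pvG on the remaining suffix. -/
lemma pvA_loop (cs : List Char) (m : Nat) : ∀ (l i : Nat) (ans : Int),
    m = cs.length - i → l ≤ i → i ≤ cs.length →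
    (∀ j, l ≤ j → j < i → cs[j]? = cs[l]?) →
    ((PySem.List.pyRange (i : Int) ((cs.length : Int) + 1) 1).foldl
      (fun (st : Int × Int) right =>
        if right == (cs.length : Int) || PySem.List.pyGet? cs right != PySem.List.pyGet? cs st.1 then
          (right, st.2 + PySem.Int.floordiv ((right - st.1) * ((right - st.1) + 1)) 2)
        else st)
      ((l : Int), ans)).2
      = ans + pvG (PySem.List.pyGet? cs (l : Int)) ((i : Int) - (l : Int)) (cs.drop i) := by
  induction m with
  | zero =>
      intro l i ans hm hli hin _
      have hi : i = cs.length := by omega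
      subst hi
      rw [PySem.List.pyRange_one_cons (by omega), PySem.List.pyRange_one_eq_nil (by omega)]
      simp [pvG, pvTri]
  | succ m ih =>
      intro l i ans hm hli hin hrun
      have hiltn : i < cs.length := by omega
      rw [PySem.List.pyRange_one_cons (by exact_mod_cast by omega)]
      simp only [List.foldl_cons]
      have hne : ((i : Int) == (cs.length : Int)) = false := by
        simp; omega
      have hgi : PySem.List.pyGet? cs (i : Int) = cs[i]? := PySem.List.pyGet?_natCast cs i
      have hgl : PySem.List.pyGet? cs (l : Int) = cs[l]? := PySem.List.pyGet?_natCast cs l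
      have hdrop : cs.drop i = cs[i] :: cs.drop (i + 1) := by
        exact (List.drop_eq_getElem_cons hiltn)
      by_cases heq : cs[i]? = cs[l]?
      · -- same char: loop state unchanged, run extends
        have hstep : (if ((i : Int) == (cs.length : Int) ||
            PySem.List.pyGet? cs (i : Int) != PySem.List.pyGet? cs (l : Int)) = true then
              ((i : Int), ans + PySem.Int.floordiv (((i:Int) - (l:Int)) * (((i:Int) - (l:Int)) + 1)) 2)
            else ((l : Int), ans)) = ((l : Int), ans) := by
          simp [hne, hgi, hgl, heq]
        rw [hstep]
        have := ih l (i + 1) ans (by omega) (by omega) (by omega)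
          (by intro j hlj hji
              by_cases hj : j < i
              · exact hrun j hlj hj
              · have : j = i := by omega
                subst this; exact heq)
        rw [(by push_cast; ring_nf : ((i : Int) + 1) = ((i + 1 : Nat) : Int))]
        rw [this]
        congr 1
        rw [hgl, hdrop]
        have hcl : (some cs[i] : Option Char) = cs[l]? := by
          rw [← heq]; simp [List.getElem?_eq_getElem hiltn]
        simp only [pvG, if_pos hcl]
        congr 1
        push_cast; ring
      · -- boundary: flush the block, start new block at i
        have hstep : (if ((i : Int) == (cs.length : Int) ||
            PySem.List.pyGet? cs (i : Int) != PySem.List.pyGet? cs (l : Int)) = true then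
              ((i : Int), ans + PySem.Int.floordiv (((i:Int) - (l:Int)) * (((i:Int) - (l:Int)) + 1)) 2)
            else ((l : Int), ans)) = ((i : Int), ans + PySem.Int.floordiv (((i:Int) - (l:Int)) * (((i:Int) - (l:Int)) + 1)) 2) := by
          simp [hne, hgi, hgl, heq]
        rw [hstep]
        have := ih i (i + 1) (ans + PySem.Int.floordiv (((i:Int) - (l:Int)) * (((i:Int) - (l:Int)) + 1)) 2)
          (by omega) (by omega) (by omega) (by intro j h1 h2; congr 1; omega)
        rw [(by push_cast; ring_nf : ((i : Int) + 1) = ((i + 1 : Nat) : Int))]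
        rw [this]
        rw [hgl, hgi, hdrop]
        have hci : (cs[i]? : Option Char) = some cs[i] := List.getElem?_eq_getElem hiltn
        have hcne : (some cs[i] : Option Char) ≠ cs[l]? := by rw [← hci]; exact fun h => heq h
        simp only [pvG, if_neg hcne, hci]
        have : ((i + 1 : Nat) : Int) - (i : Int) = 1 := by push_cast; ring
        rw [this]
        unfold pvTri
        ring

/-- B's loop equals pvG minus the already-accumulated part of the current run. -/
lemma pvB_loop (cs : List Char) : ∀ (prev : Option Char) (cur ans : Int), 0 ≤ cur →
    ((cs.foldl
      (fun (st : Option Char × Int × Int) c =>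
        (some c, if st.1 == some c then st.2.1 + 1 else 1,
          st.2.2 + (if st.1 == some c then st.2.1 + 1 else 1)))
      (prev, cur, ans)).2.2)
      = ans + pvG prev cur cs - pvTri cur := by
  induction cs with
  | nil => intro prev cur ans _; simp [pvG]
  | cons c r ih =>
      intro prev cur ans hcur
      rw [List.foldl_cons]
      by_cases h : prev = some c
      · have hstep : ((some c, if (prev, cur, ans).1 == some c then (prev, cur, ans).2.1 + 1 else 1,
            (prev, cur, ans).2.2 + (if (prev, cur, ans).1 == some c then (prev, cur, ans).2.1 + 1 else 1)) : Option Char × Int × Int)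
            = (some c, cur + 1, ans + (cur + 1)) := by
          simp [h]
        rw [hstep, ih (some c) (cur + 1) (ans + (cur + 1)) (by omega)]
        have : pvG prev cur (c :: r) = pvG (some c) (cur + 1) r := by
          subst h; simp [pvG]
        rw [this, pvTri_succ cur hcur]
        ring
      · have hstep : ((some c, if (prev, cur, ans).1 == some c then (prev, cur, ans).2.1 + 1 else 1,
            (prev, cur, ans).2.2 + (if (prev, cur, ans).1 == some c then (prev, cur, ans).2.1 + 1 else 1)) : Option Char × Int × Int)
            = (some c, 1, ans + 1) := by
          simp [h]
        rw [hstep, ih (some c) 1 (ans + 1) (by omega)]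
        have hne2 : ¬ (some c = prev) := fun hh => h hh.symm
        have : pvG prev cur (c :: r) = pvTri cur + pvG (some c) 1 r := by
          simp [pvG, hne2]
        rw [this]
        have h1 : pvTri 1 = 1 := by decide
        rw [h1]; ring

-- ===== VERDICT (by name: the statement is the Claim_ definition above) =====
theorem countLetters3_spec : Claim_equal_countLetters3 := by
  intro S _
  unfold Spec_countLetters3 countLetters3 countLetters3_alt
  simp only [PySem.Str.len_eq]
  have hA := pvA_loop S.toList (S.toList.length) 0 0 0 (by omega) (le_refl _) (by omega)
    (by intro j h1 h2; omega)
  have hB := pvB_loop S.toList none 0 0 (le_refl 0)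
  have hg : ∀ (r : Int), PySem.Str.pyGet? S r = PySem.List.pyGet? S.toList r := by
    intro r; simp [PySem.Str.pyGet?]
  simp only [hg, Nat.cast_zero] at *
  rw [hA, hB]
  simp [pvG_zero (PySem.List.pyGet? S.toList 0) none, pvTri, PySem.Int.floordiv]
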